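-- pv_equiv track=rewrite | github.com/alwyn-ds25/InvoiceAutomation | InvoiceCoreProcessor/src/invoice_core_processor/core/workflow.py | get_validation_status
-- ===== SOURCE A (Python) =====
-- def get_validation_status(validation_results: list) -> str:
--     if not validation_results:
--         return "PASS"
--     if any(r.get("status") == "FAIL" for r in validation_results):
--         return "FAIL"
--     if any(r.get("status") == "WARN" for r in validation_results):
--         return "REVIEW"
--     return "PASS"
-- ===== SOURCE B (Python) =====
-- def get_validation_status(validation_results: list) -> str:
--     severity = {"FAIL": 2, "WARN": 1}
--     worst = 0
--     for r in validation_results: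
--         worst = max(worst, severity.get(r.get("status"), 0))
--     if worst >= 2:
--         return "FAIL"
--     if worst == 1:
--         return "REVIEW"
--     return "PASS"
-- ===== Notes on version B (the rewrite author's own statement) =====
-- stated objective: alternative
-- what changed: Replaces the empty-list guard and two staged any() scans with a single accumulator pass that folds each result's status into a numeric worst-severity rank (FAIL=2, WARN=1, else 0) and decodes the rank at the end.
import Mathlib
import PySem

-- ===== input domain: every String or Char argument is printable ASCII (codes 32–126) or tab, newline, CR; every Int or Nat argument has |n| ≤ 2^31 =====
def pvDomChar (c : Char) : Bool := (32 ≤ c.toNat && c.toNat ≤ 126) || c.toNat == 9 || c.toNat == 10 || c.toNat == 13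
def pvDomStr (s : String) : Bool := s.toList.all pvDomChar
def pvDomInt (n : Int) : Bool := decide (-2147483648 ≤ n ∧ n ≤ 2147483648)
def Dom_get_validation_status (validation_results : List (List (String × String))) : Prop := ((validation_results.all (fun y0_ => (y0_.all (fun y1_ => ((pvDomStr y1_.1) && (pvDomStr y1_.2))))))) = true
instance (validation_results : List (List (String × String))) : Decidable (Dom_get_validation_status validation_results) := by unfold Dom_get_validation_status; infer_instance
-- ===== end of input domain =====

-- ===== PORT A =====
-- A: empty-list guard, then two any() scans in precedence order.  B: one
-- accumulator pass folding each status into a numeric worst-severity rank.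
def get_validation_status (validation_results : List (List (String × String))) : String :=
  if validation_results = [] then "PASS"
  else if validation_results.any (fun r => (PySem.Dict.mk r).get? "status" == some "FAIL") then "FAIL"
  else if validation_results.any (fun r => (PySem.Dict.mk r).get? "status" == some "WARN") then "REVIEW"
  else "PASS"

-- ===== PORT B =====
-- severity.get(r.get("status"), 0): None key never matches a string key, so 0
def pvSev (r : List (String × String)) : Nat :=
  match (PySem.Dict.mk r).get? "status" with
  | some s => (PySem.Dict.mk [("FAIL", (2 : Nat)), ("WARN", 1)]).getD s 0
  | none => 0

def get_validation_status_alt (validation_results : List (List (String × String))) : String :=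
  let worst := validation_results.foldl (fun acc r => max acc (pvSev r)) 0
  if worst ≥ 2 then "FAIL"
  else if worst = 1 then "REVIEW"
  else "PASS"

-- ===== PRECONDITION & SPEC =====
def Spec_get_validation_status (validation_results : List (List (String × String))) (out : String) : Prop := out = get_validation_status_alt validation_results
instance (validation_results : List (List (String × String))) (out : String) : Decidable (Spec_get_validation_status validation_results out) := by unfold Spec_get_validation_status; infer_instance

-- ===== CLAIM (what is proved, stated in full; the proofs are below) =====
def Claim_equal_get_validation_status : Prop := ∀ (validation_results : List (List (String × String))), Dom_get_validation_status validation_results → Spec_get_validation_status validation_results (get_validation_status validation_results)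

-- ===== LEMMAS AND PROOFS =====

lemma pvSev_table (s : String) (hf : s ≠ "FAIL") (hw : s ≠ "WARN") :
    (PySem.Dict.mk [("FAIL", (2 : Nat)), ("WARN", 1)]).getD s 0 = 0 := by
  have h1 : ("FAIL" == s) = false := beq_eq_false_iff_ne.mpr (Ne.symm hf)
  have h2 : ("WARN" == s) = false := beq_eq_false_iff_ne.mpr (Ne.symm hw)
  simp [PySem.Dict.getD, PySem.Dict.get?, List.find?, h1, h2]

lemma pvSev_eq (r : List (String × String)) :
    pvSev r
      = (if (PySem.Dict.mk r).get? "status" == some "FAIL" then 2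
         else if (PySem.Dict.mk r).get? "status" == some "WARN" then 1
         else 0) := by
  unfold pvSev
  rcases h : (PySem.Dict.mk r).get? "status" with _ | s
  · simp
  · simp only [beq_iff_eq, Option.some.injEq]
    by_cases hf : s = "FAIL"
    · subst hf; simp [PySem.Dict.getD, PySem.Dict.get?]
    · by_cases hw : s = "WARN"
      · subst hw; simp [PySem.Dict.getD, PySem.Dict.get?]
      · simp [hf, hw, pvSev_table s hf hw]

lemma foldl_max_acc (vrs : List (List (String × String))) (a : Nat) :
    vrs.foldl (fun acc r => max acc (pvSev r)) a
      = max a (vrs.foldl (fun acc r => max acc (pvSev r)) 0) := by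
  induction vrs generalizing a with
  | nil => simp
  | cons r rest ih =>
    simp only [List.foldl_cons]
    rw [ih (max a (pvSev r)), ih (max 0 (pvSev r))]
    omega

lemma fold_char (vrs : List (List (String × String))) :
    vrs.foldl (fun acc r => max acc (pvSev r)) 0
      = (if vrs.any (fun r => (PySem.Dict.mk r).get? "status" == some "FAIL") then 2
         else if vrs.any (fun r => (PySem.Dict.mk r).get? "status" == some "WARN") then 1
         else 0) := by
  induction vrs with
  | nil => simp
  | cons r rest ih =>
    simp only [List.foldl_cons, List.any_cons]
    rw [foldl_max_acc, ih, pvSev_eq]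
    by_cases hF : (PySem.Dict.mk r).get? "status" = some "FAIL" <;>
      by_cases hW : (PySem.Dict.mk r).get? "status" = some "WARN" <;>
        simp [hF, hW] <;> split_ifs <;> omega

-- ===== VERDICT (by name: the statement is the Claim_ definition above) =====
theorem get_validation_status_spec : Claim_equal_get_validation_status := by
  intro vrs _
  unfold Spec_get_validation_status get_validation_status get_validation_status_alt
  simp only [fold_char]
  rcases vrs with _ | ⟨r, rest⟩
  · simp
  · simp only [if_neg (List.cons_ne_nil r rest)]
    split_ifs <;> simp_all
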